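-- pv_equiv track=rewrite | github.com/fsalazarsch/algoritmos-varios | python/blackjack.py | verificar_mano
-- ===== SOURCE A (Python) =====
-- def verificar_mano(jugador):
--     tiene_as = False
--     tiene_carta_mayor = False
--
--     for carta, pinta in jugador:
--         if carta == "A":
--             tiene_as = True
--         if carta in ["J", "Q", "K", "10"]:
--             tiene_carta_mayor = True
--
--     return tiene_as and tiene_carta_mayor
-- ===== SOURCE B (Python) =====
-- ALTAS = ("J", "Q", "K", "10")
--
-- def _resumen(cartas):
--     # divide and conquer: summarise a half-hand as (tiene_as, tiene_alta)
--     if len(cartas) == 0: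
--         return (False, False)
--     if len(cartas) == 1:
--         carta = cartas[0][0]
--         return (carta == "A", carta in ALTAS)
--     m = len(cartas) // 2
--     a1, h1 = _resumen(cartas[:m])
--     a2, h2 = _resumen(cartas[m:])
--     return (a1 or a2, h1 or h2)
--
-- def verificar_mano(jugador):
--     tiene_as, tiene_alta = _resumen(list(jugador))
--     return tiene_as and tiene_alta
-- ===== Notes on version B (the rewrite author's own statement) =====
-- stated objective: alternative
-- what changed: Replaces A's left-to-right flag-setting loop with a divide-and-conquer recursion that splits the hand in halves, summarises each half as an (has-ace, has-high-card) pair, and merges the summaries with disjunctions.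
import Mathlib
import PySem

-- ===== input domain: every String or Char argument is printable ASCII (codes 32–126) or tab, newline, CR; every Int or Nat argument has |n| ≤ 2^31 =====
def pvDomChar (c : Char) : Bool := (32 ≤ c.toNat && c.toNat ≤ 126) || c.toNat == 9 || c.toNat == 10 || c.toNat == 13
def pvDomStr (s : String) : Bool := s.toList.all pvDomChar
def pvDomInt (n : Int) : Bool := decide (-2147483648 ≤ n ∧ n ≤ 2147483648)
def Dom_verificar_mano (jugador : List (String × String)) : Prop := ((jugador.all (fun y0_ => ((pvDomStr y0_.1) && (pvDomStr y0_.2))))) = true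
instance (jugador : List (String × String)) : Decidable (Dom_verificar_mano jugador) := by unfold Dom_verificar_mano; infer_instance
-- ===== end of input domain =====

-- B replaces A's flag-setting scan with a divide-and-conquer recursion merging per-half (has-ace, has-high-card) summaries (alternative decomposition).


-- ===== PORT A =====
-- the loop body of A: update (tiene_as, tiene_carta_mayor) for one (carta, pinta)
def pasoA (st : Bool × Bool) (cp : String × String) : Bool × Bool :=
  let st1 := if cp.1 == "A" then (true, st.2) else st
  if ["J", "Q", "K", "10"].contains cp.1 then (st1.1, true) else st1

def verificar_mano (jugador : List (String × String)) : Bool :=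
  let st := jugador.foldl pasoA (false, false)
  st.1 && st.2

-- ===== PORT B =====
def altasB : List String := ["J", "Q", "K", "10"]

-- divide and conquer: summarise a half-hand as (tiene_as, tiene_alta);
-- the fuel parameter (≥ length suffices) only makes the halving recursion structural
def resumenB (fuel : Nat) (cartas : List (String × String)) : Bool × Bool :=
  match fuel with
  | 0 => (false, false)
  | fuel + 1 =>
    if cartas.length = 0 then (false, false)
    else if cartas.length = 1 then
      let carta := (cartas[0]!).1
      (carta == "A", altasB.contains carta)
    else
      let m := cartas.length / 2
      let p1 := resumenB fuel (cartas.take m)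
      let p2 := resumenB fuel (cartas.drop m)
      (p1.1 || p2.1, p1.2 || p2.2)

def verificar_mano_alt (jugador : List (String × String)) : Bool :=
  let r := resumenB jugador.length jugador
  r.1 && r.2

-- ===== PRECONDITION & SPEC =====
def Spec_verificar_mano (jugador : List (String × String)) (out : Bool) : Prop := out = verificar_mano_alt jugador
instance (jugador : List (String × String)) (out : Bool) : Decidable (Spec_verificar_mano jugador out) := by unfold Spec_verificar_mano; infer_instance

-- ===== CLAIM =====
def Claim_equal_verificar_mano : Prop := ∀ (jugador : List (String × String)), Dom_verificar_mano jugador → Spec_verificar_mano jugador (verificar_mano jugador)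

-- ===== LEMMAS AND PROOFS =====

theorem str_beq_decide (a b : String) : (a == b) = decide (a = b) := by
  by_cases h : a = b
  · subst h; simp
  · simp [h]

theorem str_beq_comm (a b : String) : (a == b) = (b == a) := by
  by_cases hab : a = b
  · subst hab; rfl
  · simp [hab, Ne.symm hab]

-- one step of A's loop, written as two boolean ors
theorem pasoA_eq (st : Bool × Bool) (cp : String × String) :
    pasoA st cp
    = (st.1 || (cp.1 == "A"), st.2 || ["J", "Q", "K", "10"].contains cp.1) := by
  unfold pasoA
  cases hb : (cp.1 == "A") <;>
    cases hc : (["J", "Q", "K", "10"].contains cp.1) <;> simp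

-- A's fold, started from an arbitrary flag pair
theorem verificar_mano_foldl (jugador : List (String × String)) (st : Bool × Bool) :
    jugador.foldl pasoA st
    = (st.1 || (jugador.map (fun cp => cp.1)).contains "A",
       st.2 || jugador.any (fun cp => ["J", "Q", "K", "10"].contains cp.1)) := by
  induction jugador generalizing st with
  | nil => simp
  | cons hd tl ih =>
    rw [List.foldl_cons, ih, pasoA_eq]
    simp [Bool.or_assoc, str_beq_comm]

-- B's divide-and-conquer summary computes "ace present" and "high card present" over the hand
theorem resumenB_eq (fuel : Nat) (cartas : List (String × String))
    (hf : cartas.length ≤ fuel) :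
    resumenB fuel cartas
    = ((cartas.map (fun cp => cp.1)).contains "A",
       cartas.any (fun cp => altasB.contains cp.1)) := by
  induction fuel generalizing cartas with
  | zero =>
    have : cartas = [] := List.eq_nil_of_length_eq_zero (Nat.le_zero.mp hf)
    subst this; simp [resumenB]
  | succ fuel ih =>
    rw [resumenB]
    by_cases h0 : cartas.length = 0
    · have : cartas = [] := List.eq_nil_of_length_eq_zero h0
      subst this; simp
    · by_cases h1 : cartas.length = 1
      · obtain ⟨cp, rfl⟩ := List.length_eq_one_iff.mp h1
        simp [str_beq_comm, str_beq_decide]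
      · have hm1 : (cartas.take (cartas.length / 2)).length ≤ fuel := by
          simp only [List.length_take]; omega
        have hm2 : (cartas.drop (cartas.length / 2)).length ≤ fuel := by
          simp only [List.length_drop]; omega
        have hsplit : cartas.take (cartas.length / 2) ++ cartas.drop (cartas.length / 2)
            = cartas := List.take_append_drop _ _
        simp only [h0, h1, if_false, ih _ hm1, ih _ hm2, List.contains_eq_mem,
          List.map_take, List.map_drop, Prod.mk.injEq]
        refine ⟨?_, ?_⟩
        · rw [Bool.eq_iff_iff]
          simp only [Bool.or_eq_true, decide_eq_true_eq]
          rw [← List.mem_append, List.take_append_drop]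
        · rw [← List.any_append, hsplit]

-- ===== VERDICT =====
theorem verificar_mano_spec : Claim_equal_verificar_mano := by
  intro jugador _
  unfold Spec_verificar_mano verificar_mano verificar_mano_alt
  simp only [verificar_mano_foldl, resumenB_eq _ _ (Nat.le_refl _), Bool.false_or, altasB]
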